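-- pv_equiv track=rewrite | github.com/AntonZamyatin/bio-python-course | task5/task5.py | correctbracketsequences
-- ===== SOURCE A (Python) =====
-- def correctbracketsequences(n):
--     """Function.
--
--     I returns correct bracket sequence with length n.
--     """
--     def gen_n(n, pref='', balance=0):
--         if len(pref) == 2 * n and balance == 0:
--             yield pref
--         else:
--             for i in ('(', ')'):
--                 new_pref = pref + i
--                 new_balance = balance + (1 if i == '(' else -1)
--                 if len(new_pref) <= 2 * n and new_balance >= 0:
--                     yield from gen_n(n, new_pref, new_balance)
--     return list(gen_n(n))
-- ===== SOURCE B (Python) =====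
-- def correctbracketsequences(n):
--     total = 2 * n
--     result = []
--     stack = [("", 0)]
--     while stack:
--         pref, bal = stack.pop()
--         if len(pref) == total and bal == 0:
--             result.append(pref)
--         else:
--             if bal - 1 >= 0 and len(pref) + 1 <= total:
--                 stack.append((pref + ")", bal - 1))
--             if bal + 1 >= 0 and len(pref) + 1 <= total:
--                 stack.append((pref + "(", bal + 1))
--     return result
-- ===== Notes on version B (the rewrite author's own statement) =====
-- stated objective: alternative
-- what changed: The recursive generator is replaced by an explicit iterative while-loop backtracking over a stack of (prefix, balance) states, pushing the ')' extension before the '(' one so output order is preserved.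
import Mathlib
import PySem

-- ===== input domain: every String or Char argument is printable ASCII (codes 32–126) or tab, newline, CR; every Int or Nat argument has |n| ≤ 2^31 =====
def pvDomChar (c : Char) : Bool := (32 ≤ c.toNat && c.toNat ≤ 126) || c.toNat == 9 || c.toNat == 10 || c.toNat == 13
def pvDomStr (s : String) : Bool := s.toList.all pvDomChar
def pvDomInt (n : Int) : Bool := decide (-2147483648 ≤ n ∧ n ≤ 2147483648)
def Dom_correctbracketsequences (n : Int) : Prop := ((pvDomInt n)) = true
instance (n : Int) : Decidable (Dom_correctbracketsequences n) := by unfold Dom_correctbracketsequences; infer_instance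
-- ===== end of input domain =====

-- B replaces A's recursive generator by an explicit iterative backtracking loop over a stack of
-- (prefix, balance) states (alternative decomposition, same cost).

-- small arithmetic facts cited by the termination proofs below
theorem pvCastLen (pref : List Char) (c : Char) :
    (((pref ++ [c]).length : Int)) = (pref.length : Int) + 1 := by
  simp

theorem pvToNatLt (a b : Int) (h : a + 1 ≤ b) : (b - (a + 1)).toNat < (b - a).toNat :=
  (Int.toNat_lt_toNat (sub_pos.mpr (lt_of_lt_of_le (lt_add_one a) h))).mpr
    (sub_lt_sub_left (lt_add_one a) b)

theorem pvToNatSucc (a b : Int) (h : a + 1 ≤ b) : (b - (a + 1)).toNat + 1 = (b - a).toNat := by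
  have h0 : 0 ≤ b - (a + 1) := sub_nonneg.mpr h
  have hba : b - a = (b - (a + 1)) + 1 := by ring
  rw [hba, Int.toNat_add h0 zero_le_one, Int.toNat_one]

theorem pvOneLePow (k : Nat) : 1 ≤ 3 ^ k := Nat.one_le_pow k 3 (by norm_num)

theorem pvTwoMulPowLt (k : Nat) : 2 * 3 ^ k < 3 ^ (k + 1) := by
  rw [pow_succ, Nat.mul_comm (3 ^ k) 3]
  exact (Nat.mul_lt_mul_right (Nat.lt_of_lt_of_le Nat.zero_lt_one (pvOneLePow k))).mpr
    (by norm_num)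

-- termination measure lemma for port A's recursion (cited by name in decreasing_by)
theorem pvLenDec (n : Int) (pref : List Char) (c : Char) (h : (pref.length : Int) + 1 ≤ 2 * n) :
    (2 * n - ((pref ++ [c]).length : Int)).toNat < (2 * n - (pref.length : Int)).toNat := by
  rw [pvCastLen]
  exact pvToNatLt (pref.length : Int) (2 * n) h

-- ===== PORT A =====
-- A's inner recursive generator gen_n, over List Char; the for-loop over ('(', ')') is
-- unrolled into its two iterations, in order, each guarded exactly as in the Python.
def pvGenA (n : Int) (pref : List Char) (bal : Int) : List (List Char) :=
  if (pref.length : Int) = 2 * n ∧ bal = 0 then [pref]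
  else
    (if (pref.length : Int) + 1 ≤ 2 * n ∧ bal + 1 ≥ 0 then pvGenA n (pref ++ ['(']) (bal + 1) else []) ++
    (if (pref.length : Int) + 1 ≤ 2 * n ∧ bal - 1 ≥ 0 then pvGenA n (pref ++ [')']) (bal - 1) else [])
termination_by (2 * n - pref.length).toNat
decreasing_by
  · rename_i h; exact pvLenDec n pref '(' h.1
  · rename_i h; exact pvLenDec n pref ')' h.1

def correctbracketsequences (n : Int) : List String :=
  (pvGenA n [] 0).map String.ofList

-- ===== PORT B =====
-- potential of a stack entry, used only as the termination measure of the while-loop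
def pvPot (n : Int) (s : List Char × Int) : Nat := 3 ^ ((2 * n - s.1.length).toNat)

theorem pvExpSucc (n : Int) (pref : List Char) (c : Char) (h : (pref.length : Int) + 1 ≤ 2 * n) :
    (2 * n - ((pref ++ [c]).length : Int)).toNat + 1 = (2 * n - (pref.length : Int)).toNat := by
  rw [pvCastLen]
  exact pvToNatSucc (pref.length : Int) (2 * n) h

-- termination measure lemmas for B's loop (cited by name in decreasing_by)
theorem pvSumDec1 (n : Int) (pref : List Char) (bal : Int) (rest : List (List Char × Int)) :
    ((rest.map (pvPot n)).sum) < ((((pref, bal) :: rest).map (pvPot n)).sum) := by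
  simp only [List.map_cons, List.sum_cons]
  exact Nat.lt_add_of_pos_left (pvOneLePow _)

theorem pvSumDec2 (n : Int) (pref : List Char) (bal : Int) (rest : List (List Char × Int)) :
    (((if bal + 1 ≥ 0 ∧ (pref.length : Int) + 1 ≤ 2 * n then
          (pref ++ ['('], bal + 1) ::
            (if bal - 1 ≥ 0 ∧ (pref.length : Int) + 1 ≤ 2 * n then (pref ++ [')'], bal - 1) :: rest else rest)
        else
          (if bal - 1 ≥ 0 ∧ (pref.length : Int) + 1 ≤ 2 * n then (pref ++ [')'], bal - 1) :: rest
          else rest)).map (pvPot n)).sum) < ((((pref, bal) :: rest).map (pvPot n)).sum) := by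
  split_ifs with hA hB hB <;> simp only [pvPot, List.map_cons, List.sum_cons]
  · have h1 := pvExpSucc n pref '(' hA.2
    have h2 := pvExpSucc n pref ')' hB.2
    have heq := Nat.succ_injective (h2.trans h1.symm)
    rw [← h1, heq, ← Nat.add_assoc, ← two_mul]
    exact Nat.add_lt_add_right (pvTwoMulPowLt _) _
  · have h1 := pvExpSucc n pref '(' hA.2
    rw [← h1]
    exact Nat.add_lt_add_right
      (Nat.lt_of_le_of_lt (Nat.le_mul_of_pos_left _ Nat.zero_lt_two) (pvTwoMulPowLt _)) _
  · have h2 := pvExpSucc n pref ')' hB.2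
    rw [← h2]
    exact Nat.add_lt_add_right
      (Nat.lt_of_le_of_lt (Nat.le_mul_of_pos_left _ Nat.zero_lt_two) (pvTwoMulPowLt _)) _
  · exact Nat.lt_add_of_pos_left (pvOneLePow _)

-- B's while-loop: pop a state, emit it if complete, otherwise push the ')' extension then the '(' one.
def pvRunB (n : Int) (stack : List (List Char × Int)) (result : List (List Char)) : List (List Char) :=
  match stack with
  | [] => result
  | (pref, bal) :: rest =>
    if (pref.length : Int) = 2 * n ∧ bal = 0 then
      pvRunB n rest (result ++ [pref])
    else
      let rest1 := if bal - 1 ≥ 0 ∧ (pref.length : Int) + 1 ≤ 2 * n then (pref ++ [')'], bal - 1) :: rest else rest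
      let rest2 := if bal + 1 ≥ 0 ∧ (pref.length : Int) + 1 ≤ 2 * n then (pref ++ ['('], bal + 1) :: rest1 else rest1
      pvRunB n rest2 result
termination_by (stack.map (pvPot n)).sum
decreasing_by
  · exact pvSumDec1 n pref bal rest
  · exact pvSumDec2 n pref bal rest

def correctbracketsequences_alt (n : Int) : List String :=
  (pvRunB n [([], 0)] []).map String.ofList

-- ===== PRECONDITION & SPEC =====
-- Pre_ excludes n ≥ 499: there A raises RecursionError (the generator's initial descent nests
-- 2n+1 generator frames, past CPython's default recursion limit of 1000) and returns no value.
def Pre_correctbracketsequences (n : Int) : Prop := n ≤ 498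
instance (n : Int) : Decidable (Pre_correctbracketsequences n) := by unfold Pre_correctbracketsequences; infer_instance
def pvWitness_correctbracketsequences : Int := (2)

def Spec_correctbracketsequences (n : Int) (out : List String) : Prop := out = correctbracketsequences_alt n
instance (n : Int) (out : List String) : Decidable (Spec_correctbracketsequences n out) := by unfold Spec_correctbracketsequences; infer_instance

-- ===== CLAIM (what is proved, stated in full; the proofs are below) =====
def Claim_equal_correctbracketsequences : Prop := ∀ (n : Int), Dom_correctbracketsequences n → Pre_correctbracketsequences n → Spec_correctbracketsequences n (correctbracketsequences n)

-- ===== LEMMAS AND PROOFS =====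

-- The stack loop emits exactly the concatenation of the recursive generator's outputs over the stack.
theorem pvRunB_eq (n : Int) (stack : List (List Char × Int)) (result : List (List Char)) :
    pvRunB n stack result = result ++ stack.flatMap (fun s => pvGenA n s.1 s.2) := by
  fun_induction pvRunB n stack result with
  | case1 => simp
  | case2 result pref bal rest h ih =>
    rw [ih]
    have : pvGenA n pref bal = [pref] := by rw [pvGenA, if_pos h]
    simp [this]
  | case3 result pref bal rest h r1 r2 ih =>
    rw [ih]
    have hr1 : r1 = (if bal - 1 ≥ 0 ∧ (pref.length : Int) + 1 ≤ 2 * n then (pref ++ [')'], bal - 1) :: rest else rest) := rfl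
    have hr2 : r2 = (if bal + 1 ≥ 0 ∧ (pref.length : Int) + 1 ≤ 2 * n then (pref ++ ['('], bal + 1) :: r1 else r1) := rfl
    rw [hr2, hr1]
    have hgen : pvGenA n pref bal =
        (if (pref.length : Int) + 1 ≤ 2 * n ∧ bal + 1 ≥ 0 then pvGenA n (pref ++ ['(']) (bal + 1) else []) ++
        (if (pref.length : Int) + 1 ≤ 2 * n ∧ bal - 1 ≥ 0 then pvGenA n (pref ++ [')']) (bal - 1) else []) := by
      rw [pvGenA, if_neg h]
    simp only [List.flatMap_cons, hgen]
    split_ifs <;> simp_all <;> omega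

-- ===== VERDICT (by name: the statement is the Claim_ definition above) =====
theorem correctbracketsequences_spec : Claim_equal_correctbracketsequences := by
  intro n _ _
  unfold Spec_correctbracketsequences correctbracketsequences correctbracketsequences_alt
  rw [pvRunB_eq]
  simp
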